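-- pv_equiv track=rewrite | github.com/SouravJohar/nQueens-solver-gui | genes.py | _diagonal_elements
-- ===== SOURCE A (Python) =====
-- def _diagonal_elements(element, row, column):
--     sum = row + column
--     diff = row - column
--     dx = []
--     for i in range(len(element)):
--         for j in range(len(element)):
--             if i + j == sum or i - j == diff:
--                 dx.append(element[i][j])
--     return dx
-- ===== SOURCE B (Python) =====
-- def _diagonal_elements(element, row, column):
--     n = len(element)
--     s = row + column
--     d = row - column
--     dx = []
--     for i in range(n):
--         for j in sorted({s - i, i - d}):
--             if 0 <= j < n:
--                 dx.append(element[i][j])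
--     return dx
-- ===== Notes on version B (the rewrite author's own statement) =====
-- stated objective: faster
-- what changed: Instead of scanning all n*n cells and testing each against the two diagonal equations, B computes for each row i the at most two column indices j = s-i and j = i-d directly, visits them in ascending order with dedup, and keeps those inside [0,n).
import Mathlib
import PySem

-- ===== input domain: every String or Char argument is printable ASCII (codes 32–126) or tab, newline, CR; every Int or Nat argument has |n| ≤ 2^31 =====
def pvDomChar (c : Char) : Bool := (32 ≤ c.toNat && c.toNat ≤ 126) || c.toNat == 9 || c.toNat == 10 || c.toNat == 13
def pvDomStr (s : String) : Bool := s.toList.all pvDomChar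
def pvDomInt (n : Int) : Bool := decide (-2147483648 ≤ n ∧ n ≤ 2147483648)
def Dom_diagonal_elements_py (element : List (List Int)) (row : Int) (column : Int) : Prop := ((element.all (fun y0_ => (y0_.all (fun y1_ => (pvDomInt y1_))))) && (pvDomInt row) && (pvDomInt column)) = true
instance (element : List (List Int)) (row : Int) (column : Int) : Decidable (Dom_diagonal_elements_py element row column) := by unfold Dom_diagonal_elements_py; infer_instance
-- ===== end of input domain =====

-- B replaces A's O(n^2) scan of all cells by directly computing the ≤2 diagonal columns per row (O(n)).


-- ===== PORT A =====
-- element[i][j] is ported as pyGetD with default; Pre_ below excludes exactly the inputs where Python's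
-- indexing would raise (a too-short row hit by a diagonal).
def diagonal_elements_py (element : List (List Int)) (row : Int) (column : Int) : List Int :=
  let sum := row + column
  let diff := row - column
  (PySem.List.pyRange 0 (element.length : Int) 1).foldl (fun dx i =>
    (PySem.List.pyRange 0 (element.length : Int) 1).foldl (fun dx j =>
      if i + j == sum || i - j == diff then
        dx ++ [PySem.List.pyGetD (PySem.List.pyGetD element i []) j 0]
      else dx) dx) []

-- ===== PORT B =====
-- sorted({s - i, i - d}) on a two-element set is ported literally as min/max with dedup.
def diagonal_elements_py_alt (element : List (List Int)) (row : Int) (column : Int) : List Int :=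
  let n : Int := (element.length : Int)
  let s := row + column
  let d := row - column
  (PySem.List.pyRange 0 n 1).foldl (fun dx i =>
    let a := min (s - i) (i - d)
    let b := max (s - i) (i - d)
    (if a = b then [a] else [a, b]).foldl (fun dx j =>
      if 0 ≤ j ∧ j < n then
        dx ++ [PySem.List.pyGetD (PySem.List.pyGetD element i []) j 0]
      else dx) dx) []

-- ===== PRECONDITION & SPEC =====
-- Pre_ excludes exactly the inputs where Python A raises IndexError: a row i shorter than some in-range
-- diagonal column j with i+j = row+column or i-j = row-column.
def Pre_diagonal_elements_py (element : List (List Int)) (row : Int) (column : Int) : Prop :=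
  ∀ k, k < element.length → ∀ j, j < element.length →
    ((k : Int) + (j : Int) = row + column ∨ (k : Int) - (j : Int) = row - column) →
    j < (element.getD k []).length
instance (element : List (List Int)) (row : Int) (column : Int) : Decidable (Pre_diagonal_elements_py element row column) := by unfold Pre_diagonal_elements_py; infer_instance

def pvWitness_diagonal_elements_py : List (List Int) × Int × Int := ([[1, 2], [3, 4]], 0, 1)

def Spec_diagonal_elements_py (element : List (List Int)) (row : Int) (column : Int) (out : List Int) : Prop := out = diagonal_elements_py_alt element row column
instance (element : List (List Int)) (row : Int) (column : Int) (out : List Int) : Decidable (Spec_diagonal_elements_py element row column out) := by unfold Spec_diagonal_elements_py; infer_instance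

-- ===== CLAIM (what is proved, stated in full; the proofs are below) =====
def Claim_equal_diagonal_elements_py : Prop := ∀ (element : List (List Int)) (row : Int) (column : Int), Dom_diagonal_elements_py element row column → Pre_diagonal_elements_py element row column → Spec_diagonal_elements_py element row column (diagonal_elements_py element row column)

-- ===== LEMMAS AND PROOFS =====

-- A's inner scan over range(n) keeps exactly the (at most two) solutions j of j = a or j = b inside [0, n).
lemma pv_filter_two_nat (m : Nat) (a b : Int) (hab : a ≤ b) :
    ((List.range m).map (fun k : Nat => (k : Int))).filter (fun j => j == a || j == b)
      = (if 0 ≤ a ∧ a < (m : Int) then [a] else [])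
        ++ (if a ≠ b ∧ 0 ≤ b ∧ b < (m : Int) then [b] else []) := by
  induction m with
  | zero => simp
  | succ m ih =>
      rw [List.range_succ, List.map_append, List.filter_append, ih]
      simp only [List.map_cons, List.map_nil, List.filter_cons, List.filter_nil]
      push_cast
      split_ifs <;> simp_all <;> omega

-- B's two-candidate loop body, written as append of the filtered singletons.
lemma pv_fold_two (g : Int → Int) (n a b : Int) (dx : List Int) :
    dx ++ List.map g ((if 0 ≤ a ∧ a < n then [a] else [])
        ++ (if a ≠ b ∧ 0 ≤ b ∧ b < n then [b] else []))
      = List.foldl (fun dx j => if 0 ≤ j ∧ j < n then dx ++ [g j] else dx) dx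
          (if a = b then [a] else [a, b]) := by
  by_cases hEq : a = b
  · subst hEq
    split_ifs <;> simp_all
  · rw [if_neg hEq]
    simp only [List.foldl_cons, List.foldl_nil]
    split_ifs <;> simp_all

-- One row of A equals one row of B, for any cell reader g.
lemma pv_inner_eq (g : Int → Int) (n s d i : Int) (dx : List Int) :
    (PySem.List.pyRange 0 n 1).foldl (fun dx j =>
        if i + j == s || i - j == d then dx ++ [g j] else dx) dx
      = (if min (s - i) (i - d) = max (s - i) (i - d)
            then [min (s - i) (i - d)]
            else [min (s - i) (i - d), max (s - i) (i - d)]).foldl (fun dx j =>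
          if 0 ≤ j ∧ j < n then dx ++ [g j] else dx) dx := by
  rw [PySem.List.foldl_append_if (fun j => i + j == s || i - j == d) g]
  have hr : PySem.List.pyRange 0 n 1 = (List.range n.toNat).map (fun k : Nat => (k : Int)) := by
    simp [PySem.List.pyRange_one]
  rcases le_total (s - i) (i - d) with h | h
  · rw [min_eq_left h, max_eq_right h,
      List.filter_congr (fun j _ => by
        rw [Bool.eq_iff_iff]; simp only [Bool.or_eq_true, beq_iff_eq]; omega :
        ∀ j ∈ PySem.List.pyRange 0 n 1,
          (i + j == s || i - j == d) = (j == (s - i) || j == (i - d))),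
      hr, pv_filter_two_nat n.toNat (s - i) (i - d) h,
      if_congr (by omega : 0 ≤ s - i ∧ s - i < ((n.toNat : Int)) ↔ 0 ≤ s - i ∧ s - i < n) rfl rfl,
      if_congr (by omega : s - i ≠ i - d ∧ 0 ≤ i - d ∧ i - d < ((n.toNat : Int)) ↔
        s - i ≠ i - d ∧ 0 ≤ i - d ∧ i - d < n) rfl rfl,
      pv_fold_two g n (s - i) (i - d) dx]
  · rw [min_eq_right h, max_eq_left h,
      List.filter_congr (fun j _ => by
        rw [Bool.eq_iff_iff]; simp only [Bool.or_eq_true, beq_iff_eq]; omega :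
        ∀ j ∈ PySem.List.pyRange 0 n 1,
          (i + j == s || i - j == d) = (j == (i - d) || j == (s - i))),
      hr, pv_filter_two_nat n.toNat (i - d) (s - i) h,
      if_congr (by omega : 0 ≤ i - d ∧ i - d < ((n.toNat : Int)) ↔ 0 ≤ i - d ∧ i - d < n) rfl rfl,
      if_congr (by omega : i - d ≠ s - i ∧ 0 ≤ s - i ∧ s - i < ((n.toNat : Int)) ↔
        i - d ≠ s - i ∧ 0 ≤ s - i ∧ s - i < n) rfl rfl,
      pv_fold_two g n (i - d) (s - i) dx]

-- ===== VERDICT (by name: the statement is the Claim_ definition above) =====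
theorem diagonal_elements_py_spec : Claim_equal_diagonal_elements_py := by
  intro element row column _ _
  unfold Spec_diagonal_elements_py diagonal_elements_py diagonal_elements_py_alt
  dsimp only
  congr 1
  funext dx i
  exact pv_inner_eq (fun j => PySem.List.pyGetD (PySem.List.pyGetD element i []) j 0)
    (element.length : Int) (row + column) (row - column) i dx
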